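-- pv_equiv track=rewrite | github.com/graphsignal/solver-demo | solutions/1009-E.py | calculate_difficulty
-- ===== SOURCE A (Python) =====
-- def calculate_difficulty(n, a):
--     MOD = 998244353
--     # Precompute powers of 2 modulo MOD
--     power_of_2 = [1] * (n + 1)
--     for i in range(1, n + 1):
--         power_of_2[i] = (power_of_2[i - 1] * 2) % MOD
--
--     # Calculate s = sum(a[i] * 2^(n-i) for all i)
--     total_sum = 0
--     for i in range(n):
--         total_sum = (total_sum + a[i] * power_of_2[n - 1 - i]) % MOD
--
--     return total_sum
-- ===== SOURCE B (Python) =====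
-- def calculate_difficulty(n, a):
--     MOD = 998244353
--     total = 0
--     for i in range(n):
--         total = (total * 2 + a[i]) % MOD
--     return total
-- ===== Notes on version B (the rewrite author's own statement) =====
-- stated objective: simpler
-- what changed: Single-pass Horner evaluation (total = (total*2 + a[i]) % MOD) replaces the precomputed power-of-2 table plus weighted-sum loop.
import Mathlib
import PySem

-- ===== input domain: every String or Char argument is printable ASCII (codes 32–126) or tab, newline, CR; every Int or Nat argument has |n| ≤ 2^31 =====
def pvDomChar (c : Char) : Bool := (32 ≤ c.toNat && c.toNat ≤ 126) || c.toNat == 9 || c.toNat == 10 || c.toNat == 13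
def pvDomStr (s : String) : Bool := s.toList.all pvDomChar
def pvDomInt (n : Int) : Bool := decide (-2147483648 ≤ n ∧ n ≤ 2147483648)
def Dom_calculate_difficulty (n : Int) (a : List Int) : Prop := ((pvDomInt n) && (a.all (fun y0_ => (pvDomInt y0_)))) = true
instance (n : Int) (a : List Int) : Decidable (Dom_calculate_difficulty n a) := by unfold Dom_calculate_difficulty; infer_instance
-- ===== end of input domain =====

-- B replaces A's power-of-2 table plus weighted-sum loop by a single-pass Horner evaluation (simpler, O(1) extra space).


-- ===== PORT A =====
def calculate_difficulty (n : Int) (a : List Int) : Int :=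
  let MOD : Int := 998244353
  -- power_of_2 = [1] * (n + 1)  (Python list repetition: empty when n + 1 ≤ 0, matching toNat's clamp)
  let power_of_2 : List Int := List.replicate (n + 1).toNat 1
  -- for i in range(1, n + 1): power_of_2[i] = (power_of_2[i - 1] * 2) % MOD
  let power_of_2 := (PySem.List.pyRange 1 (n + 1) 1).foldl
    (fun pw i => PySem.List.pySetD pw i (PySem.Int.mod (PySem.List.pyGetD pw (i - 1) 0 * 2) MOD)) power_of_2
  let total_sum : Int := 0
  -- for i in range(n): total_sum = (total_sum + a[i] * power_of_2[n - 1 - i]) % MOD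
  -- a[i] ported with pyGetD: Pre_ guarantees i < len(a), so the default is never used
  (PySem.List.pyRange 0 n 1).foldl
    (fun t i => PySem.Int.mod (t + PySem.List.pyGetD a i 0 * PySem.List.pyGetD power_of_2 (n - 1 - i) 0) MOD) total_sum

-- ===== PORT B =====
def calculate_difficulty_alt (n : Int) (a : List Int) : Int :=
  let MOD : Int := 998244353
  -- for i in range(n): total = (total * 2 + a[i]) % MOD
  (PySem.List.pyRange 0 n 1).foldl
    (fun total i => PySem.Int.mod (total * 2 + PySem.List.pyGetD a i 0) MOD) 0

-- ===== PRECONDITION & SPEC =====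
-- Pre_ excludes exactly the inputs where Python A raises IndexError (n > len(a)); B raises there too.
def Pre_calculate_difficulty (n : Int) (a : List Int) : Prop := n ≤ (a.length : Int)
instance (n : Int) (a : List Int) : Decidable (Pre_calculate_difficulty n a) := by unfold Pre_calculate_difficulty; infer_instance
def pvWitness_calculate_difficulty : Int × List Int := (3, [5, -7, 11])

def Spec_calculate_difficulty (n : Int) (a : List Int) (out : Int) : Prop := out = calculate_difficulty_alt n a
instance (n : Int) (a : List Int) (out : Int) : Decidable (Spec_calculate_difficulty n a out) := by unfold Spec_calculate_difficulty; infer_instance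

-- ===== CLAIM (what is proved, stated in full; the proofs are below) =====
def Claim_equal_calculate_difficulty : Prop := ∀ (n : Int) (a : List Int), Dom_calculate_difficulty n a → Pre_calculate_difficulty n a → Spec_calculate_difficulty n a (calculate_difficulty n a)

-- ===== LEMMAS AND PROOFS =====

-- The power table built by A's first loop holds 2^j % MOD at every index.
lemma pv_buildTable (N : Nat) : ∀ (m k : Nat), k + m = N + 1 → 1 ≤ k →
    ∀ pw : List Int, pw.length = N + 1 →
    (∀ j : Nat, j < k → pw.getD j 0 = 2 ^ j % 998244353) →
    ∀ j : Nat, j < N + 1 →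
    ((PySem.List.pyRange (k : Int) ((N : Int) + 1) 1).foldl
        (fun pw i => PySem.List.pySetD pw i
          (PySem.Int.mod (PySem.List.pyGetD pw (i - 1) 0 * 2) 998244353)) pw).getD j 0
      = 2 ^ j % 998244353 := by
  intro m
  induction m with
  | zero =>
    intro k hk hk1 pw hlen hpw j hj
    have hke : (k : Int) = (N : Int) + 1 := by omega
    rw [hke, PySem.List.pyRange_one_eq_nil (by omega)]
    exact hpw j (by omega)
  | succ m ih =>
    intro k hk hk1 pw hlen hpw j hj
    have hkN : k ≤ N := by omega
    rw [PySem.List.pyRange_one_cons (by exact_mod_cast by omega)]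
    simp only [List.foldl_cons]
    have hidx : ((k : Int) - 1) = ((k - 1 : Nat) : Int) := by omega
    have hval : PySem.Int.mod (PySem.List.pyGetD pw ((k : Int) - 1) 0 * 2) 998244353
        = 2 ^ k % 998244353 := by
      rw [hidx, PySem.List.pyGetD_natCast, hpw (k - 1) (by omega),
        PySem.Int.mod_eq_emod_of_pos (by norm_num), Int.mul_emod, Int.emod_emod_of_dvd _ dvd_rfl,
        ← Int.mul_emod]
      congr 1
      rw [← pow_succ]
      congr 1
      omega
    have hset : PySem.List.pySetD pw (k : Int)
          (PySem.Int.mod (PySem.List.pyGetD pw ((k : Int) - 1) 0 * 2) 998244353)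
        = pw.set k (2 ^ k % 998244353) := by
      rw [hval, PySem.List.pySetD_natCast]
    rw [hset]
    have hcast : ((k : Int)) + 1 = ((k + 1 : Nat) : Int) := by omega
    rw [hcast]
    refine ih (k + 1) (by omega) (by omega) _ (by simp [hlen]) ?_ j hj
    intro j hj'
    rcases Nat.lt_or_ge j k with h | h
    · rw [List.getD_eq_getElem?_getD, List.getElem?_set_ne (by omega),
        ← List.getD_eq_getElem?_getD]
      exact hpw j h
    · have hjk : j = k := by omega
      subst hjk
      rw [List.getD_eq_getElem?_getD, List.getElem?_set_self (by omega)]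
      rfl

-- A's second loop computes the weighted sum mod MOD (table entries already rewritten to 2^j % MOD).
lemma pv_loopA (a pw : List Int) (n : Nat)
    (hpw : ∀ j : Nat, j < n + 1 → pw.getD j 0 = 2 ^ j % 998244353) :
    ∀ m : Nat, m ≤ n →
    (PySem.List.pyRange 0 (m : Int) 1).foldl
        (fun t i => PySem.Int.mod
          (t + PySem.List.pyGetD a i 0 * PySem.List.pyGetD pw ((n : Int) - 1 - i) 0) 998244353) 0
      = (∑ i ∈ Finset.range m, a.getD i 0 * 2 ^ (n - 1 - i)) % 998244353 := by
  intro m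
  induction m with
  | zero => intro _; simp [PySem.List.pyRange_one_eq_nil]
  | succ m ih =>
    intro hm
    have hcast : ((m + 1 : Nat) : Int) = (m : Int) + 1 := by omega
    rw [hcast, PySem.List.pyRange_one_succ_right (by omega), List.foldl_append, ih (by omega)]
    simp only [List.foldl_cons, List.foldl_nil]
    have hidx : ((n : Int) - 1 - (m : Int)) = ((n - 1 - m : Nat) : Int) := by omega
    rw [hidx, PySem.List.pyGetD_natCast, PySem.List.pyGetD_natCast,
      hpw (n - 1 - m) (by omega), PySem.Int.mod_eq_emod_of_pos (by norm_num),
      Finset.sum_range_succ]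
    rw [Int.add_emod, Int.mul_emod (a.getD m 0), Int.emod_emod_of_dvd _ dvd_rfl,
      Int.emod_emod_of_dvd _ dvd_rfl, ← Int.mul_emod, ← Int.add_emod]

-- B's Horner loop computes the same weighted sum mod MOD.
lemma pv_loopB (a : List Int) :
    ∀ m : Nat,
    (PySem.List.pyRange 0 (m : Int) 1).foldl
        (fun total i => PySem.Int.mod (total * 2 + PySem.List.pyGetD a i 0) 998244353) 0
      = (∑ i ∈ Finset.range m, a.getD i 0 * 2 ^ (m - 1 - i)) % 998244353 := by
  intro m
  induction m with
  | zero => simp [PySem.List.pyRange_one_eq_nil]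
  | succ m ih =>
    have hcast : ((m + 1 : Nat) : Int) = (m : Int) + 1 := by omega
    rw [hcast, PySem.List.pyRange_one_succ_right (by omega), List.foldl_append, ih]
    simp only [List.foldl_cons, List.foldl_nil]
    rw [PySem.List.pyGetD_natCast, PySem.Int.mod_eq_emod_of_pos (by norm_num)]
    rw [Int.add_emod, Int.mul_emod, Int.emod_emod_of_dvd _ dvd_rfl, ← Int.mul_emod, ← Int.add_emod]
    congr 1
    rw [Finset.sum_range_succ, Finset.sum_mul]
    have hterm : ∀ i ∈ Finset.range m,
        a.getD i 0 * 2 ^ (m - 1 - i) * 2 = a.getD i 0 * 2 ^ (m + 1 - 1 - i) := by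
      intro i hi
      rw [Finset.mem_range] at hi
      rw [mul_assoc, ← pow_succ]
      congr 2
      omega
    rw [Finset.sum_congr rfl hterm]
    simp

-- ===== VERDICT (by name: the statement is the Claim_ definition above) =====
theorem calculate_difficulty_spec : Claim_equal_calculate_difficulty := by
  intro n a _ hpre
  unfold Spec_calculate_difficulty calculate_difficulty calculate_difficulty_alt
  rcases lt_or_ge n 0 with hn | hn
  · rw [PySem.List.pyRange_one_eq_nil (show n ≤ 0 by omega)]; simp
  · lift n to Nat using hn with N
    have hpw : ∀ j : Nat, j < N + 1 →
        ((PySem.List.pyRange 1 ((N : Int) + 1) 1).foldl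
          (fun pw i => PySem.List.pySetD pw i
            (PySem.Int.mod (PySem.List.pyGetD pw (i - 1) 0 * 2) 998244353))
          (List.replicate ((N : Int) + 1).toNat 1)).getD j 0 = 2 ^ j % 998244353 := by
      have h1 : ((1 : Nat) : Int) = (1 : Int) := by norm_num
      have := pv_buildTable N N 1 (by omega) (le_refl 1)
        (List.replicate ((N : Int) + 1).toNat 1)
        (by simp)
        (by intro j hj
            have hj0 : j = 0 := by omega
            subst hj0
            rw [List.getD_eq_getElem?_getD, List.getElem?_replicate]
            simp)
      rw [h1] at this
      exact this
    rw [pv_loopA a _ N hpw N (le_refl N), pv_loopB a N]
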